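-- pv_equiv track=rewrite | github.com/Datta2901/CCC | .history/Day 3/Practice/Answers/DisciplinedPairs_20210307225017.py | solve
-- ===== SOURCE A (Python) =====
-- def solve(nums):
--     pair_dict = {}
--     stack = []
--     for i, num in enumerate(nums):
--         while stack and num > nums[stack[-1]]:
--             j = stack.pop()
--             gap = i-j
--             num_possible_starting_point = j-stack[-1] if stack else j+1
--             pair_dict[gap] = max(pair_dict.get(gap, 0), num_possible_starting_point)
--         stack.append(i)
--
--     return sum(pair_dict.values())
-- ===== SOURCE B (Python) =====
-- def solve(nums):
--     n = len(nums)
--     best = {}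
--     for j in range(n):
--         i = next((m for m in range(j + 1, n) if nums[m] > nums[j]), None)
--         if i is None:
--             continue
--         k = next((m for m in range(j - 1, -1, -1) if nums[m] >= nums[j]), None)
--         start = j - k if k is not None else j + 1
--         gap = i - j
--         if best.get(gap, 0) < start:
--             best[gap] = start
--     return sum(best.values())
-- ===== Notes on version B (the rewrite author's own statement) =====
-- stated objective: alternative
-- what changed: Replaces the single monotonic-stack pass (pairs discovered at pop time, start read from the live stack) by a direct per-index decomposition: for each j scan right for the first strictly greater element and left for the nearest >= element, then take the max start per gap; no stack or pop-time state at all.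
import Mathlib
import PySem

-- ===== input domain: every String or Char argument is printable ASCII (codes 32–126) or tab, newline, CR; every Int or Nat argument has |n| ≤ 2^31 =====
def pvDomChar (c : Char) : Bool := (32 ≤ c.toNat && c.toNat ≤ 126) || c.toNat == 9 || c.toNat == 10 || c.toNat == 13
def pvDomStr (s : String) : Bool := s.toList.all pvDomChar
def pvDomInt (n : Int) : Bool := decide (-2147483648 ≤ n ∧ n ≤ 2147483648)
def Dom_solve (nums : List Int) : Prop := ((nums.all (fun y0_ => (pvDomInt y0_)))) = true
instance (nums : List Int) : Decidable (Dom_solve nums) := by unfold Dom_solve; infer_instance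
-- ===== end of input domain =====

-- B replaces A's single monotonic-stack pass by a direct per-index decomposition (scan right
-- for the first strictly greater element, scan left for the nearest ≥ element); same value, no speedup claimed.

-- ===== PORT A =====
-- A's Python stack appends/pops at the right end; the port keeps the stack head-as-top,
-- so stack.append(i) is cons and stack[-1]/pop read the head.
def solveAPop (nums : List Int) (i num : Int) :
    List Int → PySem.Dict Int Int → PySem.Dict Int Int × List Int
  | [], d => (d, [])
  | j :: rest, d =>
    if num > PySem.List.pyGetD nums j 0 then
      solveAPop nums i num rest
        (d.insert (i - j)
          (max (d.getD (i - j) 0) (match rest with | k :: _ => j - k | [] => j + 1)))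
    else (d, j :: rest)

def solve (nums : List Int) : Int :=
  (((PySem.List.enumerate nums).foldl
      (fun s p =>
        let r := solveAPop nums p.1 p.2 s.2 s.1
        (r.1, p.1 :: r.2))
      (PySem.Dict.empty, ([] : List Int))).1).values.sum

-- ===== PORT B =====
-- first index m in (j, n) with nums[m] > nums[j]  (the `next(... if nums[m] > nums[j])`)
def nextGtB (nums : List Int) (j : Int) : Option Int :=
  (PySem.List.pyRange (j + 1) (PySem.List.len nums)).find?
    (fun m => decide (PySem.List.pyGetD nums m 0 > PySem.List.pyGetD nums j 0))

-- first index m in j-1, j-2, …, 0 with nums[m] >= nums[j]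
def prevGeB (nums : List Int) (j : Int) : Option Int :=
  (PySem.List.pyRange (j - 1) (-1) (-1)).find?
    (fun m => decide (PySem.List.pyGetD nums m 0 ≥ PySem.List.pyGetD nums j 0))

def solve_alt (nums : List Int) : Int :=
  ((PySem.List.pyRange 0 (PySem.List.len nums)).foldl
    (fun best j =>
      match nextGtB nums j with
      | none => best
      | some i =>
        let start : Int := match prevGeB nums j with | some k => j - k | none => j + 1
        if best.getD (i - j) 0 < start then best.insert (i - j) start else best)
    PySem.Dict.empty).values.sum

-- ===== PRECONDITION & SPEC =====
def Spec_solve (nums : List Int) (out : Int) : Prop := out = solve_alt nums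
instance (nums : List Int) (out : Int) : Decidable (Spec_solve nums out) := by unfold Spec_solve; infer_instance

-- ===== CLAIM (what is proved, stated in full; the proofs are below) =====
def Claim_equal_solve : Prop := ∀ (nums : List Int), Dom_solve nums → Spec_solve nums (solve nums)

-- ===== LEMMAS AND PROOFS =====

-- value at a Nat index (all indices handled below are < nums.length)
def pvVal (nums : List Int) (j : Nat) : Int := nums.getD j 0

-- first index i > j with nums[i] > nums[j], in offset form over List.range
def pvNgt (nums : List Int) (j : Nat) : Option Nat :=
  ((List.range (nums.length - (j + 1))).find?
      (fun t => decide (pvVal nums j < pvVal nums (j + 1 + t)))).map (fun t => j + 1 + t)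

-- nearest index k < j with nums[k] ≥ nums[j], in offset form (t = 0 is index j-1)
def pvPge (nums : List Int) (j : Nat) : Option Nat :=
  ((List.range j).find?
      (fun t => decide (pvVal nums j ≤ pvVal nums (j - 1 - t)))).map (fun t => j - 1 - t)

def pvStart (nums : List Int) (j : Nat) : Int :=
  match pvPge nums j with | some k => (j : Int) - k | none => (j : Int) + 1

def pvPair (nums : List Int) (j : Nat) : Int × Int :=
  ((match pvNgt nums j with | some i => (i : Int) - j | none => 0), pvStart nums j)

-- the stack (head = top = largest index) after processing the first i elements
def pvStack (nums : List Int) : Nat → List Nat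
  | 0 => []
  | i + 1 => i :: (pvStack nums i).dropWhile (fun j => decide (pvVal nums j < pvVal nums i))

-- the (gap, start) pairs recorded while popping at step i, from a stack suffix
def pvPopPairs (nums : List Int) (i : Nat) : List Nat → List (Int × Int)
  | [] => []
  | j :: rest =>
    if pvVal nums j < pvVal nums i then
      ((i : Int) - j, match rest with | k :: _ => (j : Int) - k | [] => (j : Int) + 1)
        :: pvPopPairs nums i rest
    else []

def pvSurv (nums : List Int) (j i : Nat) : Prop :=
  ∀ m, m < i → j < m → pvVal nums m ≤ pvVal nums j

def pvBuildA (L : List (Int × Int)) (d : PySem.Dict Int Int) : PySem.Dict Int Int :=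
  L.foldl (fun d p => d.insert p.1 (max (d.getD p.1 0) p.2)) d

def pvBuildB (L : List (Int × Int)) (d : PySem.Dict Int Int) : PySem.Dict Int Int :=
  L.foldl (fun d p => if d.getD p.1 0 < p.2 then d.insert p.1 p.2 else d) d

def pvAllPairs (nums : List Int) (i : Nat) : List (Int × Int) :=
  (List.range i).flatMap (fun t => pvPopPairs nums t (pvStack nums t))

def pvPopped (nums : List Int) : List Nat :=
  (List.range nums.length).flatMap
    (fun t => (pvStack nums t).takeWhile (fun j => decide (pvVal nums j < pvVal nums t)))

def pvKeep (nums : List Int) : List Nat :=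
  (List.range nums.length).filter (fun j => (pvNgt nums j).isSome)

-- ---------- generic find?/range helpers ----------

theorem pv_find?_congr_mem {α : Type} {l : List α} {p q : α → Bool}
    (h : ∀ x ∈ l, p x = q x) : l.find? p = l.find? q := by
  induction l with
  | nil => rfl
  | cons a t ih =>
    have ha := h a (List.mem_cons_self ..)
    by_cases hp : p a = true
    · rw [List.find?_cons_of_pos hp, List.find?_cons_of_pos (ha ▸ hp)]
    · rw [List.find?_cons_of_neg (by simpa using hp),
        List.find?_cons_of_neg (by simp [← ha]; simpa using hp)]
      exact ih (fun x hx => h x (List.mem_cons_of_mem _ hx))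

theorem pv_find?_range_eq_some {p : Nat → Bool} {n t : Nat} :
    (List.range n).find? p = some t ↔ t < n ∧ p t = true ∧ ∀ s, s < t → p s = false := by
  constructor
  · intro h
    have ht : t < n := by simpa using List.mem_of_find?_eq_some h
    rcases List.find?_eq_some_iff_append.mp h with ⟨hpt, as, bs, heq, hfail⟩
    refine ⟨ht, hpt, ?_⟩
    have hlen : as.length < n := by
      have := congrArg List.length heq
      simp at this; omega
    have has : as = List.range as.length := by
      have h0 : List.take as.length (List.range n) = as := by
        rw [heq]; simp
      conv_lhs => rw [← h0]
      rw [List.take_range, Nat.min_eq_left (Nat.le_of_lt hlen)]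
    have heq2 : List.range n = List.range as.length ++ t :: bs := by rw [← has]; exact heq
    have h1 : List.range as.length ++ [as.length] = List.range as.length ++ [t] := by
      rw [← List.range_succ]
      have hmin : as.length + 1 = min (as.length + 1) n := (Nat.min_eq_left (by omega)).symm
      calc List.range (as.length + 1) = (List.range n).take (as.length + 1) := by
            rw [List.take_range, ← hmin]
        _ = List.range as.length ++ [t] := by rw [heq2, List.take_append]; simp
    have hat : t = as.length := by
      have := List.append_cancel_left h1
      simp at this; omega
    intro s hs
    have : s ∈ as := by rw [has, List.mem_range]; omega
    have := hfail s this
    simpa using this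
  · rintro ⟨ht, hpt, hfail⟩
    apply List.find?_eq_some_iff_append.mpr
    refine ⟨hpt, List.range t, List.range' (t+1) (n - t - 1), ?_, ?_⟩
    · have h1 : t :: List.range' (t+1) (n - t - 1) = List.range' t (n - t) := by
        have hn : n - t = (n - t - 1) + 1 := by omega
        rw [hn, List.range'_succ]
        simp
      rw [h1]
      have h2 : List.range t ++ List.range' t (n - t) = List.range (t + (n - t)) := by
        rw [List.range_eq_range', List.range_eq_range']
        simpa using List.range'_append (s := 0) (m := t) (n := n - t) (step := 1)
      rw [h2]
      congr 1; omega
    · intro a ha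
      simp only [List.mem_range] at ha
      simp [hfail a ha]

-- ---------- stack structure ----------

theorem pv_stack_lt (nums : List Int) : ∀ i j, j ∈ pvStack nums i → j < i := by
  intro i
  induction i with
  | zero => intro j h; simp [pvStack] at h
  | succ i ih =>
    intro j h
    rcases List.mem_cons.mp h with h | h
    · omega
    · have := ih j ((List.dropWhile_sublist _).subset h)
      omega

theorem pv_mem_dropWhile (nums : List Int) (c : Int) : ∀ (l : List Nat),
    l.Pairwise (fun a b => pvVal nums a ≤ pvVal nums b) → ∀ (x : Nat),
    (x ∈ l.dropWhile (fun j => decide (pvVal nums j < c)) ↔ x ∈ l ∧ c ≤ pvVal nums x) := by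
  intro l
  induction l with
  | nil => intro _ x; simp
  | cons y t ih =>
    intro hp x
    by_cases hy : pvVal nums y < c
    · rw [List.dropWhile_cons_of_pos (by simpa using hy), ih hp.of_cons x]
      constructor
      · rintro ⟨hx, hc⟩; exact ⟨List.mem_cons_of_mem _ hx, hc⟩
      · rintro ⟨hx, hc⟩
        rcases List.mem_cons.mp hx with rfl | hx
        · exact absurd hy (not_lt.mpr hc)
        · exact ⟨hx, hc⟩
    · rw [List.dropWhile_cons_of_neg (by simpa using hy)]
      constructor
      · intro hx
        refine ⟨hx, ?_⟩
        rcases List.mem_cons.mp hx with rfl | hx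
        · exact not_lt.mp hy
        · exact le_trans (not_lt.mp hy) (List.rel_of_pairwise_cons hp hx)
      · exact fun h => h.1

theorem pv_stack_pairwise (nums : List Int) (i : Nat) :
    (pvStack nums i).Pairwise (fun a b => b < a ∧ pvVal nums a ≤ pvVal nums b) := by
  induction i with
  | zero => simp [pvStack]
  | succ i ih =>
    rw [pvStack]
    refine List.pairwise_cons.mpr ⟨?_, List.Pairwise.sublist (List.dropWhile_sublist _) ih⟩
    intro x hx
    have hmem := (pv_mem_dropWhile nums (pvVal nums i) _ (ih.imp (fun h => h.2)) x).mp hx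
    exact ⟨pv_stack_lt nums i x hmem.1, hmem.2⟩

theorem pv_mem_stack (nums : List Int) : ∀ i j,
    j ∈ pvStack nums i ↔ j < i ∧ pvSurv nums j i := by
  intro i
  induction i with
  | zero => intro j; simp [pvStack, pvSurv]
  | succ i ih =>
    intro j
    rw [pvStack, List.mem_cons,
      pv_mem_dropWhile nums (pvVal nums i) _ ((pv_stack_pairwise nums i).imp (fun h => h.2)) j,
      ih j]
    constructor
    · rintro (rfl | ⟨⟨hj, hs⟩, hle⟩)
      · exact ⟨by omega, fun m hm hjm => absurd hjm (by omega)⟩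
      · refine ⟨by omega, fun m hm hjm => ?_⟩
        rcases Nat.lt_or_ge m i with h | h
        · exact hs m h hjm
        · have : m = i := by omega
          subst this; exact hle
    · rintro ⟨hj, hs⟩
      rcases Nat.lt_or_ge j i with h | h
      · exact Or.inr ⟨⟨h, fun m hm hjm => hs m (by omega) hjm⟩, hs i (by omega) h⟩
      · exact Or.inl (by omega)

theorem pv_exists_stack (nums : List Int) {i j : Nat} (hj : j ∈ pvStack nums i) :
    ∀ m, m < j → pvVal nums j ≤ pvVal nums m →
      ∃ k, k ∈ pvStack nums i ∧ m ≤ k ∧ k < j ∧ pvVal nums j ≤ pvVal nums k := by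
  have main : ∀ d m, j - m = d → m < j → pvVal nums j ≤ pvVal nums m →
      ∃ k, k ∈ pvStack nums i ∧ m ≤ k ∧ k < j ∧ pvVal nums j ≤ pvVal nums k := by
    intro d
    induction d using Nat.strong_induction_on with
    | _ d ih =>
      intro m hd hm hv
      have hji : j < i := (pv_mem_stack nums i j |>.mp hj).1
      by_cases hs : pvSurv nums m i
      · exact ⟨m, (pv_mem_stack nums i m).mpr ⟨by omega, hs⟩, Nat.le_refl m, hm, hv⟩
      · simp only [pvSurv, not_forall] at hs
        push Not at hs
        obtain ⟨p, hpi, hmp, hvp⟩ := hs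
        rcases lt_trichotomy p j with hpj | hpj | hpj
        · obtain ⟨k, hk1, hk2, hk3, hk4⟩ :=
            ih (j - p) (by omega) p rfl hpj (le_of_lt (lt_of_le_of_lt hv hvp))
          exact ⟨k, hk1, by omega, hk3, hk4⟩
        · subst hpj; exact absurd hvp (not_lt.mpr hv)
        · have := (pv_mem_stack nums i j |>.mp hj).2 p hpi hpj
          exact absurd hvp (not_lt.mpr (le_trans this hv))
  exact fun m hm hv => main (j - m) m rfl hm hv

-- ---------- characterizations of pvNgt / pvPge via the stack ----------

theorem pv_ngt_at (nums : List Int) {i j : Nat} (hn : i < nums.length)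
    (hj : j ∈ pvStack nums i) (hv : pvVal nums j < pvVal nums i) :
    pvNgt nums j = some i := by
  obtain ⟨hji, hsurv⟩ := pv_mem_stack nums i j |>.mp hj
  unfold pvNgt
  have hfind : (List.range (nums.length - (j + 1))).find?
      (fun t => decide (pvVal nums j < pvVal nums (j + 1 + t))) = some (i - (j + 1)) := by
    apply pv_find?_range_eq_some.mpr
    refine ⟨by omega, ?_, ?_⟩
    · have h : j + 1 + (i - (j + 1)) = i := by omega
      rw [h]; simpa using hv
    · intro s hs
      have h := hsurv (j + 1 + s) (by omega) (by omega)
      simp only [decide_eq_false_iff_not, not_lt]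
      exact h
  rw [hfind]
  simp only [Option.map_some]
  congr 1; omega

theorem pv_ngt_char (nums : List Int) {i j : Nat} (h : pvNgt nums j = some i) :
    j < i ∧ i < nums.length ∧ pvVal nums j < pvVal nums i ∧
      (∀ m, m < i → j < m → pvVal nums m ≤ pvVal nums j) := by
  unfold pvNgt at h
  cases hf : (List.range (nums.length - (j + 1))).find?
      (fun t => decide (pvVal nums j < pvVal nums (j + 1 + t))) with
  | none => rw [hf] at h; simp at h
  | some t =>
    rw [hf] at h
    simp only [Option.map_some, Option.some.injEq] at h
    obtain ⟨ht, hpt, hfail⟩ := pv_find?_range_eq_some.mp hf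
    simp only [decide_eq_true_eq] at hpt
    refine ⟨by omega, by omega, by rw [← h]; exact hpt, ?_⟩
    intro m hm hjm
    have hs := hfail (m - (j + 1)) (by omega)
    simp only [decide_eq_false_iff_not, not_lt] at hs
    have he : j + 1 + (m - (j + 1)) = m := by omega
    rw [he] at hs
    exact hs

theorem pv_pge_last (nums : List Int) {i j : Nat} {pre : List Nat}
    (hst : pvStack nums i = pre ++ [j]) : pvPge nums j = none := by
  have hj : j ∈ pvStack nums i := by rw [hst]; simp
  unfold pvPge
  have hfind : (List.range j).find?
      (fun t => decide (pvVal nums j ≤ pvVal nums (j - 1 - t))) = none := by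
    rw [List.find?_eq_none]
    intro t htmem
    simp only [List.mem_range] at htmem
    simp only [decide_eq_true_eq]
    intro hge
    obtain ⟨k, hkmem, hmk, hkj, hvk⟩ := pv_exists_stack nums hj (j - 1 - t) (by omega) hge
    rw [hst] at hkmem
    rcases List.mem_append.mp hkmem with hk | hk
    · have hp := pv_stack_pairwise nums i
      rw [hst, List.pairwise_append] at hp
      have := (hp.2.2 k hk j (by simp)).1
      omega
    · simp at hk; omega
  rw [hfind]; rfl

theorem pv_pge_adj (nums : List Int) {i j k : Nat} {pre suf : List Nat}
    (hst : pvStack nums i = pre ++ j :: k :: suf) : pvPge nums j = some k := by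
  have hj : j ∈ pvStack nums i := by rw [hst]; simp
  have hp := pv_stack_pairwise nums i
  rw [hst, List.pairwise_append] at hp
  have hjk : k < j ∧ pvVal nums j ≤ pvVal nums k :=
    (List.pairwise_cons.mp hp.2.1).1 k (by simp)
  unfold pvPge
  have hfind : (List.range j).find?
      (fun t => decide (pvVal nums j ≤ pvVal nums (j - 1 - t))) = some (j - 1 - k) := by
    apply pv_find?_range_eq_some.mpr
    refine ⟨by omega, ?_, ?_⟩
    · have h : j - 1 - (j - 1 - k) = k := by omega
      rw [h]
      simpa using hjk.2
    · intro s hs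
      simp only [decide_eq_false_iff_not, not_le]
      by_contra hge
      push Not at hge
      obtain ⟨k', hkmem, hmk, hkj, hvk⟩ :=
        pv_exists_stack nums hj (j - 1 - s) (by omega) hge
      rw [hst] at hkmem
      rcases List.mem_append.mp hkmem with hk' | hk'
      · have := (hp.2.2 k' hk' j (by simp)).1
        omega
      · rcases List.mem_cons.mp hk' with rfl | hk'
        · omega
        · rcases List.mem_cons.mp hk' with rfl | hk'
          · omega
          · have := (List.rel_of_pairwise_cons (List.pairwise_cons.mp hp.2.1).2 hk').1
            omega
  rw [hfind]
  simp only [Option.map_some]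
  congr 1; omega

-- ---------- the pop pairs are exactly the canonical pairs ----------

theorem pv_popPairs_spec (nums : List Int) {i : Nat} (hn : i < nums.length) :
    ∀ s, s <:+ pvStack nums i →
      pvPopPairs nums i s
        = (s.takeWhile (fun j => decide (pvVal nums j < pvVal nums i))).map (pvPair nums) := by
  intro s
  induction s with
  | nil => intro _; simp [pvPopPairs]
  | cons j rest ih =>
    intro h
    have hj : j ∈ pvStack nums i := h.subset (List.mem_cons_self ..)
    have hrest : rest <:+ pvStack nums i := (List.suffix_cons j rest).trans h
    by_cases hv : pvVal nums j < pvVal nums i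
    · rw [List.takeWhile_cons_of_pos (by simpa using hv)]
      simp only [pvPopPairs, if_pos hv, List.map_cons]
      refine congrArg₂ (· :: ·) ?_ (ih hrest)
      unfold pvPair
      have hngt := pv_ngt_at nums hn hj hv
      rw [hngt]
      cases rest with
      | nil =>
        obtain ⟨pre, hpre⟩ := h
        have hpge := pv_pge_last nums (pre := pre) hpre.symm
        simp [pvStart, hpge]
      | cons k rest' =>
        obtain ⟨pre, hpre⟩ := h
        have hpge := pv_pge_adj nums (pre := pre) (suf := rest') hpre.symm
        simp [pvStart, hpge]
    · rw [List.takeWhile_cons_of_neg (by simpa using hv)]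
      simp [pvPopPairs, if_neg hv]

-- ---------- A-side fold ----------

theorem solveAPop_cons (nums : List Int) (i num j : Int) (rest : List Int)
    (d : PySem.Dict Int Int) :
    solveAPop nums i num (j :: rest) d
      = if num > PySem.List.pyGetD nums j 0 then
          solveAPop nums i num rest
            (d.insert (i - j)
              (max (d.getD (i - j) 0) (match rest with | k :: _ => j - k | [] => j + 1)))
        else (d, j :: rest) := by
  simp only [solveAPop]

theorem solveAPop_cons₁ (nums : List Int) (i num j : Int) (d : PySem.Dict Int Int) :
    solveAPop nums i num [j] d
      = if num > PySem.List.pyGetD nums j 0 then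
          (d.insert (i - j) (max (d.getD (i - j) 0) (j + 1)), [])
        else (d, [j]) := by
  simp only [solveAPop]

theorem solveAPop_cons₂ (nums : List Int) (i num j k : Int) (rest : List Int)
    (d : PySem.Dict Int Int) :
    solveAPop nums i num (j :: k :: rest) d
      = if num > PySem.List.pyGetD nums j 0 then
          solveAPop nums i num (k :: rest)
            (d.insert (i - j) (max (d.getD (i - j) 0) (j - k)))
        else (d, j :: k :: rest) := by
  simp only [solveAPop]

theorem pv_popA (nums : List Int) (i : Nat) :
    ∀ (st : List Nat) (d : PySem.Dict Int Int),
      solveAPop nums (i : Int) (pvVal nums i) (st.map (fun (j : Nat) => (j : Int))) d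
        = (pvBuildA (pvPopPairs nums i st) d,
           (st.dropWhile (fun j => decide (pvVal nums j < pvVal nums i))).map (fun (j : Nat) => (j : Int))) := by
  intro st
  induction st with
  | nil => intro d; simp [solveAPop, pvPopPairs, pvBuildA]
  | cons j rest ih =>
    intro d
    have hg : PySem.List.pyGetD nums (j : Int) 0 = pvVal nums j := by
      simp [pvVal]
    by_cases hv : pvVal nums j < pvVal nums i
    · have hc : pvVal nums i > PySem.List.pyGetD nums (j : Int) 0 := by rw [hg]; exact hv
      have hb : decide (pvVal nums j < pvVal nums i) = true := by simpa using hv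
      cases rest with
      | nil =>
        rw [List.map_cons, List.map_nil, solveAPop_cons₁, if_pos hc]
        simp [pvPopPairs, if_pos hv, pvBuildA, hb]
      | cons k rest' =>
        rw [List.map_cons, List.map_cons, solveAPop_cons₂, if_pos hc, ← List.map_cons, ih]
        simp [pvPopPairs, if_pos hv, pvBuildA, hb]
    · have hc : ¬ (pvVal nums i > PySem.List.pyGetD nums (j : Int) 0) := by rw [hg]; exact hv
      have hb : decide (pvVal nums j < pvVal nums i) = false := by simpa using hv
      rw [List.map_cons, solveAPop_cons, if_neg hc]
      simp [pvPopPairs, if_neg hv, pvBuildA, hb]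

theorem pv_Afold (nums : List Int) : ∀ i,
    (List.range i).foldl
      (fun (s : PySem.Dict Int Int × List Int) (k : Nat) =>
        let r := solveAPop nums (k : Int) (PySem.List.pyGetD nums (k : Int) 0) s.2 s.1
        (r.1, ((k : Int)) :: r.2))
      (PySem.Dict.empty, ([] : List Int))
      = (pvBuildA (pvAllPairs nums i) PySem.Dict.empty,
         (pvStack nums i).map (fun (j : Nat) => (j : Int))) := by
  intro i
  induction i with
  | zero => simp [pvStack, pvAllPairs, pvBuildA]
  | succ i ih =>
    rw [List.range_succ, List.foldl_append, ih]
    simp only [List.foldl_cons, List.foldl_nil]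
    have hg : PySem.List.pyGetD nums (i : Int) 0 = pvVal nums i := by
      simp [pvVal]
    rw [hg, pv_popA]
    unfold pvAllPairs
    rw [List.range_succ, List.flatMap_append]
    simp [pvBuildA, List.foldl_append, pvStack]

theorem pv_solve_eq (nums : List Int) :
    solve nums = (pvBuildA (pvAllPairs nums nums.length) PySem.Dict.empty).values.sum := by
  have h : solve nums
      = (((List.range nums.length).foldl
          (fun (s : PySem.Dict Int Int × List Int) (k : Nat) =>
            let r := solveAPop nums (k : Int) (PySem.List.pyGetD nums (k : Int) 0) s.2 s.1
            (r.1, ((k : Int)) :: r.2))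
          (PySem.Dict.empty, ([] : List Int))).1).values.sum := by
    unfold solve
    rw [PySem.List.enumerate_eq_map_pyRange nums 0, PySem.List.len_eq,
      PySem.List.pyRange_zero_nat, List.map_map, List.foldl_map]
    rfl
  rw [h, pv_Afold]

-- ---------- B-side fold ----------

theorem pv_nextGtB (nums : List Int) (j : Nat) :
    nextGtB nums (j : Int) = (pvNgt nums j).map (fun (k : Nat) => (k : Int)) := by
  unfold nextGtB pvNgt
  rw [PySem.List.len_eq, PySem.List.pyRange_one, List.find?_map]
  have hn : (((nums.length : Int)) - ((j : Int) + 1)).toNat = nums.length - (j + 1) := by omega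
  rw [hn]
  have hfun : ((fun m => decide (PySem.List.pyGetD nums m 0 > PySem.List.pyGetD nums (j : Int) 0))
        ∘ (fun (k : Nat) => ((j : Int) + 1) + (k : Int)))
      = fun (t : Nat) => decide (pvVal nums j < pvVal nums (j + 1 + t)) := by
    funext t
    simp only [Function.comp]
    have hcast : ((j : Int) + 1 + (t : Int)) = (((j + 1 + t : Nat)) : Int) := by push_cast; ring
    rw [decide_eq_decide, gt_iff_lt, hcast, PySem.List.pyGetD_natCast, PySem.List.pyGetD_natCast]
    exact Iff.rfl
  rw [hfun, Option.map_map]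
  cases hf : (List.range (nums.length - (j + 1))).find?
      (fun t => decide (pvVal nums j < pvVal nums (j + 1 + t))) with
  | none => rfl
  | some t =>
    simp only [Option.map_some, Function.comp, Option.some.injEq]
    push_cast; ring

theorem pv_prevGeB (nums : List Int) (j : Nat) :
    prevGeB nums (j : Int) = (pvPge nums j).map (fun (k : Nat) => (k : Int)) := by
  unfold prevGeB pvPge
  rw [PySem.List.pyRange_neg_one, List.find?_map]
  have hn : ((j : Int) - 1 - (-1)).toNat = j := by omega
  rw [hn]
  rw [pv_find?_congr_mem (q := fun (t : Nat) => decide (pvVal nums j ≤ pvVal nums (j - 1 - t)))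
    (by
      intro t ht
      simp only [List.mem_range] at ht
      simp only [Function.comp]
      have hcast : ((j : Int) - 1 - (t : Int)) = (((j - 1 - t : Nat)) : Int) := by omega
      rw [decide_eq_decide, ge_iff_le, hcast, PySem.List.pyGetD_natCast, PySem.List.pyGetD_natCast]
      exact Iff.rfl)]
  cases hf : (List.range j).find? (fun t => decide (pvVal nums j ≤ pvVal nums (j - 1 - t))) with
  | none => rfl
  | some t =>
    have ht : t < j := by simpa using List.mem_of_find?_eq_some hf
    simp only [Option.map_some, Option.some.injEq]
    omega

theorem pv_solve_alt_eq (nums : List Int) :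
    solve_alt nums
      = (pvBuildB ((pvKeep nums).map (pvPair nums)) PySem.Dict.empty).values.sum := by
  unfold solve_alt
  rw [PySem.List.len_eq, PySem.List.pyRange_zero_nat, List.foldl_map]
  have hstep : ∀ (best : PySem.Dict Int Int) (k : Nat),
      (match nextGtB nums ((k : Nat) : Int) with
        | none => best
        | some i =>
          let start : Int := match prevGeB nums ((k : Nat) : Int) with
            | some k' => ((k : Nat) : Int) - k' | none => ((k : Nat) : Int) + 1
          if best.getD (i - ((k : Nat) : Int)) 0 < start then
            best.insert (i - ((k : Nat) : Int)) start else best)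
        = (if (pvNgt nums k).isSome then
            (if best.getD (pvPair nums k).1 0 < (pvPair nums k).2 then
              best.insert (pvPair nums k).1 (pvPair nums k).2 else best)
          else best) := by
    intro best k
    rw [pv_nextGtB, pv_prevGeB]
    cases hng : pvNgt nums k with
    | none => simp
    | some i =>
      simp only [Option.map_some, Option.isSome_some, if_true]
      unfold pvPair pvStart
      rw [hng]
      cases hpg : pvPge nums k with
      | none => simp
      | some k' => simp
  rw [PySem.List.foldl_congr_mem _ _
      (fun (best : PySem.Dict Int Int) (k : Nat) =>
        if (pvNgt nums k).isSome then
          (if best.getD (pvPair nums k).1 0 < (pvPair nums k).2 then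
            best.insert (pvPair nums k).1 (pvPair nums k).2 else best)
        else best) _
      (fun acc k _ => hstep acc k)]
  rw [PySem.List.foldl_if_eq_foldl_filter (fun k => (pvNgt nums k).isSome)
      (fun (best : PySem.Dict Int Int) (k : Nat) =>
        if best.getD (pvPair nums k).1 0 < (pvPair nums k).2 then
          best.insert (pvPair nums k).1 (pvPair nums k).2 else best)]
  simp only [pvBuildB, pvKeep, List.foldl_map]

-- ---------- dict characterizations ----------

theorem pv_getD_buildA (L : List (Int × Int)) : ∀ (d : PySem.Dict Int Int) (g : Int),
    (pvBuildA L d).getD g 0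
      = (L.filter (fun p => p.1 == g)).foldl (fun a p => max a p.2) (d.getD g 0) := by
  induction L with
  | nil => intro d g; simp [pvBuildA]
  | cons p L ih =>
    intro d g
    have h1 : pvBuildA (p :: L) d = pvBuildA L (d.insert p.1 (max (d.getD p.1 0) p.2)) := rfl
    rw [h1, ih]
    by_cases hpg : p.1 = g
    · subst hpg
      rw [List.filter_cons_of_pos (by simp), List.foldl_cons, PySem.Dict.getD_insert]
      simp
    · rw [List.filter_cons_of_neg (by simp [hpg]), PySem.Dict.getD_insert]
      rw [if_neg (fun h => hpg h.symm)]

theorem pv_getD_buildB (L : List (Int × Int)) : ∀ (d : PySem.Dict Int Int) (g : Int),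
    (pvBuildB L d).getD g 0
      = (L.filter (fun p => p.1 == g)).foldl (fun a p => max a p.2) (d.getD g 0) := by
  induction L with
  | nil => intro d g; simp [pvBuildB]
  | cons p L ih =>
    intro d g
    have h1 : pvBuildB (p :: L) d
        = pvBuildB L (if d.getD p.1 0 < p.2 then d.insert p.1 p.2 else d) := rfl
    rw [h1, ih]
    by_cases hpg : p.1 = g
    · subst hpg
      rw [List.filter_cons_of_pos (by simp), List.foldl_cons]
      by_cases hlt : d.getD p.1 0 < p.2
      · rw [if_pos hlt, PySem.Dict.getD_insert, if_pos rfl,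
          max_eq_right (le_of_lt hlt)]
      · rw [if_neg hlt, max_eq_left (not_lt.mp hlt)]
    · rw [List.filter_cons_of_neg (by simp [hpg])]
      by_cases hlt : d.getD p.1 0 < p.2
      · rw [if_pos hlt, PySem.Dict.getD_insert, if_neg (fun h => hpg h.symm)]
      · rw [if_neg hlt]

theorem pv_mem_keys_buildA (L : List (Int × Int)) : ∀ (d : PySem.Dict Int Int) (g : Int),
    g ∈ (pvBuildA L d).keys ↔ g ∈ L.map (·.1) ∨ g ∈ d.keys := by
  induction L with
  | nil => intro d g; simp [pvBuildA]
  | cons p L ih =>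
    intro d g
    have h1 : pvBuildA (p :: L) d = pvBuildA L (d.insert p.1 (max (d.getD p.1 0) p.2)) := rfl
    rw [h1, ih]
    simp [PySem.Dict.mem_keys_insert]
    tauto

theorem pv_mem_keys_buildB (L : List (Int × Int)) (hpos : ∀ p ∈ L, (0 : Int) < p.2) :
    ∀ (d : PySem.Dict Int Int) (g : Int),
    g ∈ (pvBuildB L d).keys ↔ g ∈ L.map (·.1) ∨ g ∈ d.keys := by
  induction L with
  | nil => intro d g; simp [pvBuildB]
  | cons p L ih =>
    intro d g
    have h1 : pvBuildB (p :: L) d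
        = pvBuildB L (if d.getD p.1 0 < p.2 then d.insert p.1 p.2 else d) := rfl
    rw [h1, ih (fun q hq => hpos q (List.mem_cons_of_mem _ hq))]
    by_cases hlt : d.getD p.1 0 < p.2
    · rw [if_pos hlt]
      simp only [PySem.Dict.mem_keys_insert, List.map_cons, List.mem_cons]
      tauto
    · rw [if_neg hlt]
      have hmem : p.1 ∈ d.keys := by
        by_contra hc
        have h0 : d.getD p.1 0 = 0 := PySem.Dict.getD_of_not_contains _ _
          (by rw [← Bool.not_eq_true, PySem.Dict.contains_iff_mem_keys]; simpa using hc)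
        rw [h0] at hlt
        exact hlt (hpos p (List.mem_cons_self ..))
      simp only [List.map_cons, List.mem_cons]
      constructor
      · tauto
      · rintro ((rfl | h) | h)
        · exact Or.inr hmem
        · tauto
        · tauto

theorem pv_nodup_keys_buildB (L : List (Int × Int)) : ∀ (d : PySem.Dict Int Int),
    d.keys.Nodup → (pvBuildB L d).keys.Nodup := by
  induction L with
  | nil => intro d h; simpa [pvBuildB] using h
  | cons p L ih =>
    intro d h
    have h1 : pvBuildB (p :: L) d
        = pvBuildB L (if d.getD p.1 0 < p.2 then d.insert p.1 p.2 else d) := rfl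
    rw [h1]
    apply ih
    by_cases hlt : d.getD p.1 0 < p.2
    · rw [if_pos hlt]; exact PySem.Dict.nodup_keys_insert _ _ _ h
    · rw [if_neg hlt]; exact h

-- ---------- the two pair lists are permutations ----------

theorem pv_mem_takeWhile {α : Type} {R : α → α → Prop} {p : α → Bool} :
    ∀ {l : List α}, l.Pairwise R → ∀ {x : α}, x ∈ l → p x = true →
      (∀ a, R a x → p a = true) → x ∈ l.takeWhile p := by
  intro l
  induction l with
  | nil => intro _ x hx; simp at hx
  | cons y t ih =>
    intro hp x hx hpx hR
    rcases List.mem_cons.mp hx with rfl | hx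
    · rw [List.takeWhile_cons_of_pos hpx]
      exact List.mem_cons_self ..
    · have hpy : p y = true := hR y (List.rel_of_pairwise_cons hp hx)
      rw [List.takeWhile_cons_of_pos hpy]
      exact List.mem_cons_of_mem _ (ih hp.of_cons hx hpx hR)

theorem pv_start_pos (nums : List Int) (j : Nat) : (0 : Int) < pvStart nums j := by
  unfold pvStart
  cases hp : pvPge nums j with
  | none => show (0 : Int) < (j : Int) + 1; omega
  | some k =>
    show (0 : Int) < (j : Int) - (k : Int)
    unfold pvPge at hp
    cases hf : (List.range j).find?
        (fun t => decide (pvVal nums j ≤ pvVal nums (j - 1 - t))) with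
    | none => rw [hf] at hp; simp at hp
    | some t =>
      rw [hf] at hp
      have ht : t < j := by simpa using List.mem_of_find?_eq_some hf
      simp only [Option.map_some, Option.some.injEq] at hp
      omega

theorem pv_mem_popped (nums : List Int) (j : Nat) :
    j ∈ pvPopped nums ↔ j ∈ pvKeep nums := by
  unfold pvPopped pvKeep
  constructor
  · intro h
    obtain ⟨t, htmem, hjt⟩ := List.mem_flatMap.mp h
    rw [List.mem_range] at htmem
    have hjstack : j ∈ pvStack nums t := (List.takeWhile_sublist _).subset hjt
    have hv : pvVal nums j < pvVal nums t := by simpa using List.mem_takeWhile_imp hjt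
    have hng := pv_ngt_at nums htmem hjstack hv
    rw [List.mem_filter, List.mem_range, hng]
    exact ⟨lt_trans (pv_stack_lt nums t j hjstack) htmem, rfl⟩
  · intro hj
    rw [List.mem_filter, List.mem_range] at hj
    obtain ⟨hjr, hs⟩ := hj
    obtain ⟨i, hi⟩ := Option.isSome_iff_exists.mp hs
    obtain ⟨hji, hin, hv, hsurv⟩ := pv_ngt_char nums hi
    rw [List.mem_flatMap]
    refine ⟨i, by rw [List.mem_range]; exact hin, ?_⟩
    have hjstack : j ∈ pvStack nums i :=
      (pv_mem_stack nums i j).mpr ⟨hji, fun m hm hjm => hsurv m hm hjm⟩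
    exact pv_mem_takeWhile (pv_stack_pairwise nums i) hjstack (by simpa using hv)
      (fun a ha => by
        simp only [decide_eq_true_eq]
        exact lt_of_le_of_lt ha.2 hv)

theorem pv_chunk_ngt (nums : List Int) {t j : Nat} (ht : t < nums.length)
    (hjt : j ∈ (pvStack nums t).takeWhile (fun j => decide (pvVal nums j < pvVal nums t))) :
    pvNgt nums j = some t := by
  have hjstack : j ∈ pvStack nums t := (List.takeWhile_sublist _).subset hjt
  have hv : pvVal nums j < pvVal nums t := by simpa using List.mem_takeWhile_imp hjt
  exact pv_ngt_at nums ht hjstack hv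

theorem pv_nodup_popped (nums : List Int) : (pvPopped nums).Nodup := by
  unfold pvPopped
  rw [List.nodup_flatMap]
  constructor
  · intro t _
    exact ((List.takeWhile_sublist _).nodup
      ((pv_stack_pairwise nums t).imp (fun h => ne_of_gt h.1)))
  · have hpw : (List.range nums.length).Pairwise
        (fun a b => a ∈ List.range nums.length ∧ b ∈ List.range nums.length ∧ a < b) :=
      List.Pairwise.and_mem.mp List.pairwise_lt_range
    refine hpw.imp ?_
    rintro t1 t2 ⟨h1, h2, hlt⟩
    intro j hj1 hj2
    rw [List.mem_range] at h1 h2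
    have e1 := pv_chunk_ngt nums h1 hj1
    have e2 := pv_chunk_ngt nums h2 hj2
    rw [e1] at e2
    simp at e2
    omega

theorem pv_perm (nums : List Int) :
    (pvAllPairs nums nums.length).Perm ((pvKeep nums).map (pvPair nums)) := by
  have hAP : pvAllPairs nums nums.length = (pvPopped nums).map (pvPair nums) := by
    unfold pvAllPairs pvPopped
    rw [List.map_flatMap, List.flatMap_def, List.flatMap_def]
    congr 1
    apply List.map_congr_left
    intro t ht
    rw [List.mem_range] at ht
    exact pv_popPairs_spec nums ht _ (List.suffix_refl _)
  rw [hAP]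
  apply List.Perm.map
  rw [List.perm_ext_iff_of_nodup (pv_nodup_popped nums)
    (show (pvKeep nums).Nodup by unfold pvKeep; exact List.Nodup.filter _ List.nodup_range)]
  exact fun j => pv_mem_popped nums j

-- ---------- final assembly ----------

theorem pv_sum_eq (nums : List Int) :
    (pvBuildA (pvAllPairs nums nums.length) PySem.Dict.empty).values.sum
      = (pvBuildB ((pvKeep nums).map (pvPair nums)) PySem.Dict.empty).values.sum := by
  have hperm : (pvAllPairs nums nums.length).Perm ((pvKeep nums).map (pvPair nums)) :=
    pv_perm nums
  have hpos : ∀ p ∈ (pvKeep nums).map (pvPair nums), (0 : Int) < p.2 := by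
    intro p hp
    obtain ⟨j, _, rfl⟩ := List.mem_map.mp hp
    exact pv_start_pos nums j
  have hnodA : (pvBuildA (pvAllPairs nums nums.length) PySem.Dict.empty).keys.Nodup := by
    unfold pvBuildA
    exact PySem.Dict.nodup_keys_foldl_insert_key _ _ _ _ PySem.Dict.nodup_keys_empty
  have hnodB : (pvBuildB ((pvKeep nums).map (pvPair nums)) PySem.Dict.empty).keys.Nodup :=
    pv_nodup_keys_buildB _ _ PySem.Dict.nodup_keys_empty
  have hkeysperm : (pvBuildA (pvAllPairs nums nums.length) PySem.Dict.empty).keys.Perm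
      ((pvBuildB ((pvKeep nums).map (pvPair nums)) PySem.Dict.empty).keys) := by
    rw [List.perm_ext_iff_of_nodup hnodA hnodB]
    intro g
    rw [pv_mem_keys_buildA, pv_mem_keys_buildB _ hpos]
    rw [PySem.Dict.keys_empty]
    simp only [List.not_mem_nil, or_false]
    exact (hperm.map (·.1)).mem_iff
  have hgetD : ∀ g, (pvBuildA (pvAllPairs nums nums.length) PySem.Dict.empty).getD g 0
      = (pvBuildB ((pvKeep nums).map (pvPair nums)) PySem.Dict.empty).getD g 0 := by
    intro g
    rw [pv_getD_buildA, pv_getD_buildB, PySem.Dict.getD_empty]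
    exact @List.Perm.foldl_eq _ _ (fun a p => max a p.2) _ _
      ⟨fun a b₁ b₂ => by simp [max_right_comm]⟩ (hperm.filter _) 0
  rw [PySem.Dict.values_eq_map_keys _ hnodA 0, PySem.Dict.values_eq_map_keys _ hnodB 0]
  rw [List.map_congr_left (fun g _ => hgetD g)]
  exact (hkeysperm.map _).sum_eq

-- ===== VERDICT (by name: the statement is the Claim_ definition above) =====
theorem solve_spec : Claim_equal_solve := by
  intro nums _
  unfold Spec_solve
  rw [pv_solve_eq, pv_sum_eq, pv_solve_alt_eq]
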